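-- pv_equiv track=rewrite | github.com/atiti/agent-jail | agent_jail/broker.py | _sanitize_delegate_name_part
-- ===== SOURCE A (Python) =====
-- def _sanitize_delegate_name_part(value):
--     cleaned = []
--     for char in value.lower():
--         if char.isalnum():
--             cleaned.append(char)
--         else:
--             cleaned.append("-")
--     text = "".join(cleaned).strip("-")
--     while "--" in text:
--         text = text.replace("--", "-")
--     return text or "script"
-- ===== SOURCE B (Python) =====
-- def _sanitize_delegate_name_part(value):
--     # single pass: never emit a leading dash or two dashes in a row,
--     # pop the (at most one) trailing dash at the end
--     out = []
--     for ch in value.lower():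
--         if ch.isalnum():
--             out.append(ch)
--         elif out and out[-1] != "-":
--             out.append("-")
--     if out and out[-1] == "-":
--         out.pop()
--     return "".join(out) or "script"
-- ===== Notes on version B (the rewrite author's own statement) =====
-- stated objective: alternative
-- what changed: replaces A's strip of the joined list plus a repeated replace("--","-") fixpoint loop by a single left-to-right pass that never emits a leading or doubled dash and pops at most one trailing dash
import Mathlib
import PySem

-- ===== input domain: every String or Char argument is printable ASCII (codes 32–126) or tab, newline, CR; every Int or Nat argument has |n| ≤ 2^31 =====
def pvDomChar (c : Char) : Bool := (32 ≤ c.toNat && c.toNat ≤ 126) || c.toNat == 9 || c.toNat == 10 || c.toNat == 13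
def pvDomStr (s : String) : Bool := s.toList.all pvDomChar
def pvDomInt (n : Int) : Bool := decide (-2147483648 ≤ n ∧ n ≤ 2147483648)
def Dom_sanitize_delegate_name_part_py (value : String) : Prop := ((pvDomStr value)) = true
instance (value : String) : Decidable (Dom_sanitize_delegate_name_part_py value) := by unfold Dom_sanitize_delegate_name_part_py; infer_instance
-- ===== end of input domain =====

-- B replaces A's map-then-strip-then-repeated-replace("--","-") fixpoint loop by a
-- single left-to-right pass that never emits a leading or doubled dash and pops at
-- most one trailing dash (objective: alternative; measured speed comparable).

-- ===== PORT A =====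

-- model of PySem.Chars.replace t "--" "-" (one left-to-right replacement sweep),
-- needed only to justify termination of the while-loop below
def pvRdd : List Char → List Char
  | [] => []
  | [c] => [c]
  | a :: b :: t => if a == '-' && b == '-' then '-' :: pvRdd t else a :: pvRdd (b :: t)

-- '"--" in text' as a structural predicate
def pvHasDD : List Char → Bool
  | a :: b :: t => (a == '-' && b == '-') || pvHasDD (b :: t)
  | _ => false

theorem pvGo_spec (fuel : Nat) (l acc : List Char) (h : l.length ≤ fuel) :
    PySem.Chars.replace.go ['-', '-'] ['-'] fuel l acc = acc.reverse ++ pvRdd l := by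
  induction fuel generalizing l acc with
  | zero =>
    have : l = [] := List.eq_nil_of_length_eq_zero (Nat.le_zero.mp h)
    subst this; simp [PySem.Chars.replace.go, pvRdd]
  | succ n ih =>
    cases l with
    | nil => simp [PySem.Chars.replace.go, pvRdd]
    | cons c t =>
      cases t with
      | nil =>
        have hpre : (['-', '-'] : List Char).isPrefixOf [c] = false := by
          simp [List.isPrefixOf]
        simp only [PySem.Chars.replace.go, hpre]
        rw [ih [] (c :: acc) (by simp)]
        simp [pvRdd]
      | cons b t' =>
        by_cases hdd : c = '-' ∧ b = '-'
        · obtain ⟨hc, hb⟩ := hdd; subst hc; subst hb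
          have hpre : (['-', '-'] : List Char).isPrefixOf ('-' :: '-' :: t') = true := by
            simp [List.isPrefixOf]
          simp only [PySem.Chars.replace.go, hpre]
          rw [show List.drop (['-','-'] : List Char).length ('-' :: '-' :: t') = t' from rfl]
          rw [ih t' (['-'].reverse ++ acc) (by simp at h ⊢; omega)]
          simp [pvRdd]
        · have hpre : (['-', '-'] : List Char).isPrefixOf (c :: b :: t') = false := by
            simp [List.isPrefixOf]
            intro hc hb
            exact hdd ⟨by simp [hc.symm], by simp [hb.symm]⟩
          simp only [PySem.Chars.replace.go, hpre]
          rw [ih (b :: t') (c :: acc) (by simp at h ⊢; omega)]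
          have : pvRdd (c :: b :: t') = c :: pvRdd (b :: t') := by
            have : (c == '-' && b == '-') = false := by
              simp only [Bool.and_eq_false_iff, beq_eq_false_iff_ne, ne_eq]
              by_cases hc : c = '-'
              · right; intro hb; exact hdd ⟨hc, hb⟩
              · left; exact hc
            simp [pvRdd, this]
          rw [this]; simp

theorem pvReplace_eq_Rdd (t : List Char) :
    PySem.Chars.replace t ['-', '-'] ['-'] = pvRdd t := by
  show PySem.Chars.replace t ['-','-'] ['-'] = _
  rw [PySem.Chars.replace]
  simp only [List.isEmpty_cons, if_false, Bool.false_eq_true]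
  exact pvGo_spec t.length t [] le_rfl

theorem pvHasDD_cons (a : Char) (l : List Char) :
    pvHasDD (a :: l) = ((a == '-' && l.head? == some '-') || pvHasDD l) := by
  cases l with
  | nil => simp [pvHasDD]
  | cons b t => simp [pvHasDD]

theorem pvIsIn_eq_hasDD (t : List Char) : PySem.Chars.isIn ['-', '-'] t = pvHasDD t := by
  by_cases h : pvHasDD t = true
  · rw [h]
    rw [PySem.Chars.isIn_iff_infix]
    -- from pvHasDD, extract an adjacent pair of dashes
    revert h
    induction t with
    | nil => intro h; simp [pvHasDD] at h
    | cons a l ih =>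
      intro h
      rw [pvHasDD_cons] at h
      rcases Bool.or_eq_true_iff.mp h with h1 | h2
      · obtain ⟨ha, hh⟩ := Bool.and_eq_true_iff.mp h1
        have ha' : a = '-' := beq_iff_eq.mp ha
        cases l with
        | nil => simp at hh
        | cons b t' =>
          have hb : b = '-' := by simpa using hh
          subst ha'; subst hb
          exact ⟨[], t', rfl⟩
      · exact List.infix_cons (ih h2)
  · have h' : pvHasDD t = false := Bool.eq_false_iff.mpr h
    rw [h']
    by_contra hc
    have hin : PySem.Chars.isIn ['-','-'] t = true := by
      cases hv : PySem.Chars.isIn ['-','-'] t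
      · exact absurd hv hc
      · rfl
    have hinf := (PySem.Chars.isIn_iff_infix _ _).mp hin
    obtain ⟨s, u, hsu⟩ := hinf
    -- adjacent dashes force pvHasDD
    have : pvHasDD t = true := by
      subst hsu
      clear hin hc h h'
      induction s with
      | nil => simp [pvHasDD]
      | cons a s' ih =>
        simp only [List.cons_append, List.append_assoc] at ih ⊢
        rw [pvHasDD_cons]
        simp only [List.nil_append] at ih ⊢
        rw [ih]
        simp
    rw [this] at h'; exact absurd h' (by simp)

theorem pvLength_Rdd_le (t : List Char) : (pvRdd t).length ≤ t.length := by
  induction t using pvRdd.induct with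
  | case1 => simp [pvRdd]
  | case2 c => simp [pvRdd]
  | case3 a b t hdd ih => simp only [pvRdd, if_pos hdd]; simp at ih ⊢; omega
  | case4 a b t hdd ih => simp only [pvRdd, if_neg hdd]; simp at ih ⊢; omega

theorem pvLength_Rdd_lt (t : List Char) (h : pvHasDD t = true) :
    (pvRdd t).length < t.length := by
  induction t using pvRdd.induct with
  | case1 => simp [pvHasDD] at h
  | case2 c => simp [pvHasDD] at h
  | case3 a b t hdd ih =>
    have := pvLength_Rdd_le t
    simp only [pvRdd, if_pos hdd]
    simp at this ⊢; omega
  | case4 a b t hdd ih =>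
    simp only [pvHasDD] at h
    rw [Bool.or_eq_true_iff] at h
    rcases h with h1 | h2
    · exact absurd h1 hdd
    · have := ih h2
      simp only [pvRdd, if_neg hdd]
      simp at this ⊢; omega

-- the 'while "--" in text: text = text.replace("--", "-")' loop of A
def pvWhileReplace (t : List Char) : List Char :=
  if PySem.Chars.isIn ['-', '-'] t then pvWhileReplace (PySem.Chars.replace t ['-', '-'] ['-']) else t
termination_by t.length
decreasing_by
  rw [pvReplace_eq_Rdd]
  exact pvLength_Rdd_lt t (by rw [← pvIsIn_eq_hasDD]; assumption)

def sanitize_delegate_name_part_py (value : String) : String :=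
  -- cleaned = [char if char.isalnum() else "-" for char in value.lower()]
  let cleaned : List Char :=
    (PySem.Chars.lower value.toList).map (fun c => if PySem.Chars.isalnum c then c else '-')
  -- text = "".join(cleaned).strip("-")   (join of single chars is the list itself)
  let text := PySem.Chars.stripChars cleaned ['-']
  -- while "--" in text: text = text.replace("--", "-")
  let text := pvWhileReplace text
  -- return text or "script"
  if text.isEmpty then "script" else String.ofList text

-- ===== PORT B =====

-- if out and out[-1] == "-": out.pop()
def pvPopTrailingDash (l : List Char) : List Char :=
  if !l.isEmpty && l.getLast? == some '-' then l.dropLast else l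

def sanitize_delegate_name_part_py_alt (value : String) : String :=
  -- for ch in value.lower(): …
  let out : List Char :=
    (PySem.Chars.lower value.toList).foldl
      (fun acc c =>
        if PySem.Chars.isalnum c then acc ++ [c]
        else if !acc.isEmpty && acc.getLast? != some '-' then acc ++ ['-'] else acc) []
  let out := pvPopTrailingDash out
  -- return "".join(out) or "script"
  if out.isEmpty then "script" else String.ofList out

-- ===== PRECONDITION & SPEC =====
def Spec_sanitize_delegate_name_part_py (value : String) (out : String) : Prop := out = sanitize_delegate_name_part_py_alt value
instance (value : String) (out : String) : Decidable (Spec_sanitize_delegate_name_part_py value out) := by unfold Spec_sanitize_delegate_name_part_py; infer_instance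

-- ===== CLAIM (what is proved, stated in full; the proofs are below) =====
def Claim_equal_sanitize_delegate_name_part_py : Prop := ∀ (value : String), Dom_sanitize_delegate_name_part_py value → Spec_sanitize_delegate_name_part_py value (sanitize_delegate_name_part_py value)

-- ===== LEMMAS AND PROOFS =====

-- canonical "collapse runs of dashes" form: both pipelines are reduced to it
def pvSq : List Char → List Char
  | [] => []
  | [a] => [a]
  | a :: b :: t => if a == '-' && b == '-' then pvSq (b :: t) else a :: pvSq (b :: t)

theorem pvSq_cons (a : Char) (l : List Char) :
    pvSq (a :: l) = if a == '-' && l.head? == some '-' then pvSq l else a :: pvSq l := by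
  cases l with
  | nil => simp [pvSq]
  | cons b t => simp [pvSq]

theorem pvHead?_Sq (l : List Char) : (pvSq l).head? = l.head? := by
  induction l using pvSq.induct with
  | case1 => rfl
  | case2 a => rfl
  | case3 a b t hdd ih =>
    simp only [pvSq, if_pos hdd]
    rw [ih]
    have : a = '-' ∧ b = '-' := by
      rw [Bool.and_eq_true_iff] at hdd
      exact ⟨beq_iff_eq.mp hdd.1, beq_iff_eq.mp hdd.2⟩
    simp [this.1, this.2]
  | case4 a b t hdd ih =>
    have hdd' : (a == '-' && b == '-') = false := Bool.eq_false_iff.mpr hdd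
    simp only [pvSq]
    rw [if_neg hdd]
    simp

theorem pvSq_ne_nil (l : List Char) (h : l ≠ []) : pvSq l ≠ [] := by
  intro hc
  have := pvHead?_Sq l
  rw [hc] at this
  cases l with
  | nil => exact h rfl
  | cons a t => simp at this

theorem pvSq_noDD (t : List Char) (h : pvHasDD t = false) : pvSq t = t := by
  induction t using pvSq.induct with
  | case1 => rfl
  | case2 a => rfl
  | case3 a b t hdd ih => simp [pvHasDD, hdd] at h
  | case4 a b t hdd ih =>
    simp only [pvHasDD, Bool.or_eq_false_iff] at h
    simp only [pvSq, if_neg hdd]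
    rw [ih h.2]

theorem pvSq_dash (t : List Char) :
    pvSq ('-' :: t) = '-' :: pvSq (t.dropWhile (fun c => c == '-')) := by
  induction t with
  | nil => simp [pvSq]
  | cons b t' ih =>
    by_cases hb : b = '-'
    · subst hb
      rw [show pvSq ('-' :: '-' :: t') = pvSq ('-' :: t') by simp [pvSq]]
      rw [ih]
      simp [List.dropWhile]
    · rw [pvSq_cons]
      rw [if_neg (show ¬(('-' : Char) == '-' && (b :: t').head? == some '-') = true by
        simp [hb])]
      rw [List.dropWhile_cons_of_neg (by simpa using hb)]

-- Sq is invariant under one replacement sweep (joint with the dash-prefixed variant)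
theorem pvSq_Rdd_aux (n : Nat) : ∀ t : List Char, t.length ≤ n →
    pvSq (pvRdd t) = pvSq t ∧ pvSq ('-' :: pvRdd t) = pvSq ('-' :: t) := by
  induction n with
  | zero =>
    intro t ht
    have : t = [] := List.eq_nil_of_length_eq_zero (Nat.le_zero.mp ht)
    subst this; exact ⟨rfl, rfl⟩
  | succ n ih =>
    intro t ht
    match t with
    | [] => exact ⟨rfl, rfl⟩
    | [c] => exact ⟨rfl, rfl⟩
    | a :: b :: t' =>
      by_cases hdd : (a == '-' && b == '-') = true
      · have ha : a = '-' := beq_iff_eq.mp (Bool.and_eq_true_iff.mp hdd).1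
        have hb : b = '-' := beq_iff_eq.mp (Bool.and_eq_true_iff.mp hdd).2
        subst ha; subst hb
        have hR : pvRdd ('-' :: '-' :: t') = '-' :: pvRdd t' := by simp [pvRdd]
        have ht' : t'.length ≤ n := by simp only [List.length_cons] at ht; omega
        obtain ⟨ih1, ih2⟩ := ih t' ht'
        constructor
        · rw [hR, ih2]
          simp [pvSq]
        · rw [hR]
          rw [show pvSq ('-' :: '-' :: pvRdd t') = pvSq ('-' :: pvRdd t') by simp [pvSq]]
          rw [ih2]
          simp [pvSq]
      · have hR : pvRdd (a :: b :: t') = a :: pvRdd (b :: t') := by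
          simp only [pvRdd, hdd]; simp
        have hbt : (b :: t').length ≤ n := by simp only [List.length_cons] at ht ⊢; omega
        obtain ⟨ih1, ih2⟩ := ih (b :: t') hbt
        have hhead : (pvRdd (b :: t')).head? = some b := by
          match t' with
          | [] => rfl
          | c :: t'' =>
            by_cases h2 : (b == '-' && c == '-') = true
            · have hb : b = '-' := beq_iff_eq.mp (Bool.and_eq_true_iff.mp h2).1
              have hc : c = '-' := beq_iff_eq.mp (Bool.and_eq_true_iff.mp h2).2
              subst hb; subst hc
              simp [pvRdd]
            · simp only [pvRdd, h2]; simp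
        have h1 : pvSq (pvRdd (a :: b :: t')) = pvSq (a :: b :: t') := by
          rw [hR, pvSq_cons, hhead]
          rw [if_neg (show ¬(a == '-' && (some b == some '-')) = true by simpa using hdd)]
          rw [ih1]
          rw [show pvSq (a :: b :: t') = a :: pvSq (b :: t') by simp [pvSq, hdd]]
        refine ⟨h1, ?_⟩
        by_cases ha : a = '-'
        · subst ha
          rw [hR]
          rw [show pvSq ('-' :: '-' :: pvRdd (b :: t')) = pvSq ('-' :: pvRdd (b :: t')) by
            simp [pvSq]]
          rw [show pvSq ('-' :: '-' :: b :: t') = pvSq ('-' :: b :: t') by simp [pvSq]]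
          exact ih2
        · rw [hR]
          rw [pvSq_cons ('-') (a :: pvRdd (b :: t'))]
          rw [pvSq_cons ('-') (a :: b :: t')]
          rw [if_neg (show ¬(('-' : Char) == '-' &&
              ((a :: pvRdd (b :: t')).head? == some '-')) = true by simp [ha])]
          rw [if_neg (show ¬(('-' : Char) == '-' &&
              ((a :: b :: t').head? == some '-')) = true by simp [ha])]
          rw [hR] at h1
          rw [h1]

theorem pvWhileReplace_eq_Sq (t : List Char) : pvWhileReplace t = pvSq t := by
  induction t using pvWhileReplace.induct with
  | case1 t hin ih =>
    rw [pvWhileReplace, if_pos hin, ih, pvReplace_eq_Rdd]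
    exact (pvSq_Rdd_aux (pvRdd t).length (pvRdd t) le_rfl).1.symm ▸
      (pvSq_Rdd_aux t.length t le_rfl).1
  | case2 t hin =>
    rw [pvWhileReplace, if_neg hin]
    have h : pvHasDD t = false := by
      rw [← pvIsIn_eq_hasDD]
      exact Bool.eq_false_iff.mpr hin
    exact (pvSq_noDD t h).symm

-- model of the right strip
def pvRstrip : List Char → List Char
  | [] => []
  | c :: t =>
    let r := pvRstrip t
    if r.isEmpty then (if c == '-' then [] else [c]) else c :: r

theorem pvRstrip_eq (l : List Char) :
    (List.dropWhile (fun c => c == '-') l.reverse).reverse = pvRstrip l := by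
  induction l with
  | nil => rfl
  | cons c t ih =>
    rw [List.reverse_cons, List.dropWhile_append]
    by_cases he : (List.dropWhile (fun c => c == '-') t.reverse).isEmpty = true
    · rw [if_pos he]
      have hr : pvRstrip t = [] := by
        rw [← ih]
        simp only [List.isEmpty_iff] at he
        rw [he]; rfl
      by_cases hc : c = '-'
      · subst hc
        simp only [pvRstrip, hr]
        simp [List.dropWhile]
      · simp only [pvRstrip, hr]
        simp [List.dropWhile, show (c == '-') = false by simp [hc]]
    · rw [if_neg he]
      have hr : ¬ (pvRstrip t).isEmpty = true := by
        rw [← ih]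
        simpa using he
      simp only [pvRstrip]
      rw [if_neg hr]
      rw [List.reverse_append, ← ih]
      rfl

theorem pvRstrip_nil_iff (t : List Char) : pvRstrip t = [] ↔ ∀ c ∈ t, c = '-' := by
  induction t with
  | nil => simp [pvRstrip]
  | cons c t' ih =>
    simp only [pvRstrip, List.mem_cons]
    by_cases he : (pvRstrip t').isEmpty = true
    · rw [if_pos he]
      have ht' : ∀ x ∈ t', x = '-' := ih.mp (List.isEmpty_iff.mp he)
      by_cases hc : c = '-'
      · rw [if_pos (beq_iff_eq.mpr hc)]
        constructor
        · intro _ x hx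
          rcases hx with h | h
          · rw [h]; exact hc
          · exact ht' x h
        · intro _; rfl
      · rw [if_neg (show ¬(c == '-') = true by simp [hc])]
        constructor
        · intro h; simp at h
        · intro h; exact absurd (h c (Or.inl rfl)) hc
    · rw [if_neg he]
      constructor
      · intro h; simp at h
      · intro h
        exact absurd (ih.mpr (fun x hx => h x (Or.inr hx))) (by simpa using he)

theorem pvHead?_rstrip (t : List Char) (h : pvRstrip t ≠ []) :
    (pvRstrip t).head? = t.head? := by
  cases t with
  | nil => exact absurd rfl h
  | cons c t' =>
    simp only [pvRstrip] at h ⊢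
    by_cases he : (pvRstrip t').isEmpty = true
    · rw [if_pos he] at h ⊢
      by_cases hc : c = '-'
      · rw [if_pos (beq_iff_eq.mpr hc)] at h; exact absurd rfl h
      · rw [if_neg (by simpa using hc)] at h ⊢; rfl
    · rw [if_neg he] at h ⊢; rfl

theorem pvPopT_cons (c : Char) (x : List Char) (hx : x ≠ []) :
    pvPopTrailingDash (c :: x) = c :: pvPopTrailingDash x := by
  unfold pvPopTrailingDash
  cases x with
  | nil => exact absurd rfl hx
  | cons b t =>
    rw [List.getLast?_cons_cons]
    by_cases h : (b :: t).getLast? == some '-'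
    · simp only [h, List.isEmpty_cons, Bool.not_false, Bool.and_true, if_pos]
      rw [List.dropLast_cons_of_ne_nil (by simp)]
    · have h' : ((b :: t).getLast? == some '-') = false := Bool.eq_false_iff.mpr h
      simp [h']

-- the key right-hand lemma: popping one trailing dash after collapsing
-- equals collapsing after the right strip
theorem pvPop_Sq_eq_Sq_rstrip (u : List Char) :
    pvPopTrailingDash (pvSq u) = pvSq (pvRstrip u) := by
  induction u with
  | nil => rfl
  | cons c t ih =>
    rw [pvSq_cons]
    by_cases hcond : (c == '-' && t.head? == some '-') = true
    · rw [if_pos hcond, ih]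
      have hc : c = '-' := beq_iff_eq.mp (Bool.and_eq_true_iff.mp hcond).1
      subst hc
      simp only [pvRstrip]
      by_cases he : (pvRstrip t).isEmpty = true
      · rw [if_pos he]
        simp only [beq_self_eq_true, if_pos]
        rw [List.isEmpty_iff.mp he]
      · rw [if_neg he]
        have hne : pvRstrip t ≠ [] := by simpa using he
        rw [pvSq_cons]
        rw [pvHead?_rstrip t hne]
        rw [(Bool.and_eq_true_iff.mp hcond).2]
        simp
    · rw [if_neg hcond]
      cases ht : t with
      | nil =>
        simp only [pvSq]
        by_cases hc : c = '-'
        · subst hc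
          simp [pvPopTrailingDash, pvRstrip, pvSq]
        · have hc' : (c == '-') = false := by simpa using hc
          simp [pvPopTrailingDash, pvRstrip, pvSq, hc']
      | cons b t' =>
        rw [← ht]
        have htne : t ≠ [] := by rw [ht]; simp
        have hSqne : pvSq t ≠ [] := pvSq_ne_nil t htne
        rw [pvPopT_cons c (pvSq t) hSqne, ih]
        simp only [pvRstrip]
        by_cases he : (pvRstrip t).isEmpty = true
        · rw [if_pos he]
          have hall : ∀ x ∈ t, x = '-' := (pvRstrip_nil_iff t).mp (List.isEmpty_iff.mp he)
          have hhb : t.head? = some '-' := by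
            rw [ht, hall b (by rw [ht]; simp)]
            rfl
          have hc : (c == '-') = false := by
            rcases Bool.and_eq_false_iff.mp (Bool.eq_false_iff.mpr hcond) with h | h
            · exact h
            · rw [hhb] at h; simp at h
          rw [List.isEmpty_iff.mp he, if_neg (show ¬(c == '-') = true by simp [hc])]
          rfl
        · rw [if_neg he]
          have hne : pvRstrip t ≠ [] := by simpa using he
          rw [pvSq_cons c (pvRstrip t), pvHead?_rstrip t hne, if_neg hcond]

-- B's fold, characterized: squeezeAfter d t emits with "previous emitted char is a
-- dash (or nothing emitted yet)" flag d
def pvSqA : Bool → List Char → List Char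
  | _, [] => []
  | d, c :: t =>
    if PySem.Chars.isalnum c then c :: pvSqA false t
    else if d then pvSqA true t else '-' :: pvSqA true t

theorem pvAlnum_ne_dash (c : Char) (h : PySem.Chars.isalnum c = true) : (c == '-') = false := by
  cases hv : (c == '-')
  · rfl
  · have hc : c = '-' := beq_iff_eq.mp hv
    subst hc
    exact absurd h (by decide)

theorem pvFoldl_eq_SqA (t : List Char) : ∀ acc : List Char,
    t.foldl (fun acc c =>
        if PySem.Chars.isalnum c then acc ++ [c]
        else if !acc.isEmpty && acc.getLast? != some '-' then acc ++ ['-'] else acc) acc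
    = acc ++ pvSqA (acc.isEmpty || acc.getLast? == some '-') t := by
  induction t with
  | nil => intro acc; simp [pvSqA]
  | cons c t' ih =>
    intro acc
    rw [List.foldl_cons]
    by_cases hal : PySem.Chars.isalnum c = true
    · rw [if_pos hal, ih]
      have h1 : (acc ++ [c]).isEmpty = false := by simp
      have h2 : (acc ++ [c]).getLast? = some c := List.getLast?_concat
      rw [h1, h2]
      have h3 : (some c == some '-') = false := by
        simpa using pvAlnum_ne_dash c hal
      simp only [pvSqA, if_pos hal, h3, Bool.false_or]
      simp
    · rw [if_neg hal]
      by_cases he : (acc.isEmpty || acc.getLast? == some '-') = true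
      · have hcond : (!acc.isEmpty && acc.getLast? != some '-') = false := by
          rcases Bool.or_eq_true_iff.mp he with h | h
          · simp [h]
          · simp [beq_iff_eq.mp h]
        rw [hcond]
        simp only [Bool.false_eq_true, if_false]
        rw [ih, he]
        simp [pvSqA, hal]
      · have he' : (acc.isEmpty || acc.getLast? == some '-') = false := Bool.eq_false_iff.mpr he
        have hcond : (!acc.isEmpty && acc.getLast? != some '-') = true := by
          rcases Bool.or_eq_false_iff.mp he' with ⟨h1, h2⟩
          simp [h1, show ¬acc.getLast? = some '-' from fun hh => by rw [hh] at h2; simp at h2]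
        rw [hcond]
        simp only [if_true]
        rw [ih]
        have h1 : (acc ++ ['-']).isEmpty = false := by simp
        have h2 : (acc ++ ['-']).getLast? = some '-' := List.getLast?_concat
        rw [h1, h2, he']
        simp [pvSqA, hal, List.append_assoc]

theorem pvSqA_dropWhile (t : List Char) :
    pvSqA true (t.dropWhile (fun c => c == '-')) = pvSqA true t := by
  induction t with
  | nil => rfl
  | cons c t' ih =>
    by_cases hc : c = '-'
    · subst hc
      rw [List.dropWhile_cons_of_pos (by simp)]
      rw [ih]
      simp [pvSqA, show PySem.Chars.isalnum '-' = false by decide]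
    · rw [List.dropWhile_cons_of_neg (by simpa using hc)]

theorem pvHead_dropWhile_ne (s : List Char) :
    (s.dropWhile (fun c => c == '-')).head? ≠ some '-' := by
  induction s with
  | nil => simp
  | cons c t ih =>
    by_cases hc : c = '-'
    · rw [List.dropWhile_cons_of_pos (by simp [hc])]; exact ih
    · rw [List.dropWhile_cons_of_neg (by simpa using hc)]
      simp [hc]

-- on lists whose characters are alnum-or-dash, SqA agrees with Sq
theorem pvSqA_eq_Sq (n : Nat) : ∀ u : List Char, u.length ≤ n →
    (∀ c ∈ u, PySem.Chars.isalnum c = !(c == '-')) →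
    (u.head? ≠ some '-' → pvSqA true u = pvSq u) ∧ pvSqA false u = pvSq u := by
  induction n with
  | zero =>
    intro u hu _
    have : u = [] := List.eq_nil_of_length_eq_zero (Nat.le_zero.mp hu)
    subst this; exact ⟨fun _ => rfl, rfl⟩
  | succ n ih =>
    intro u hu hP
    cases u with
    | nil => exact ⟨fun _ => rfl, rfl⟩
    | cons c t =>
      have hPt : ∀ x ∈ t, PySem.Chars.isalnum x = !(x == '-') :=
        fun x hx => hP x (List.mem_cons_of_mem c hx)
      by_cases hal : PySem.Chars.isalnum c = true
      · have hc : (c == '-') = false := pvAlnum_ne_dash c hal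
        have hrec : pvSqA false t = pvSq t :=
          (ih t (by simp only [List.length_cons] at hu; omega) hPt).2
        have hs : pvSq (c :: t) = c :: pvSq t := by
          rw [pvSq_cons, if_neg (by rw [hc]; simp)]
        constructor
        · intro _
          simp only [pvSqA, if_pos hal, hrec, hs]
        · simp only [pvSqA, if_pos hal, hrec, hs]
      · have hal' : PySem.Chars.isalnum c = false := Bool.eq_false_iff.mpr hal
        have hc : c = '-' := by
          have := hP c (List.mem_cons_self)
          rw [hal'] at this
          have : (c == '-') = true := by
            cases hv : (c == '-')
            · rw [hv] at this; simp at this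
            · rfl
          exact beq_iff_eq.mp this
        subst hc
        constructor
        · intro h; exact absurd rfl h
        · -- pvSqA false ('-' :: t) = '-' :: pvSqA true t
          simp only [pvSqA, hal', Bool.false_eq_true, if_false]
          rw [← pvSqA_dropWhile t]
          set w := t.dropWhile (fun c => c == '-') with hw
          have hwlen : w.length ≤ n := by
            have h1 : w.length ≤ t.length := List.length_dropWhile_le _ _
            simp only [List.length_cons] at hu; omega
          have hwP : ∀ x ∈ w, PySem.Chars.isalnum x = !(x == '-') := by
            intro x hx
            exact hPt x ((List.dropWhile_suffix _).subset hx)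
          have hwhead : w.head? ≠ some '-' := by
            rw [hw]; exact pvHead_dropWhile_ne t
          rw [(ih w hwlen hwP).1 hwhead]
          rw [pvSq_dash, ← hw]

-- B's fold runs over the lowered string; the A-side map to dashes does not change it
theorem pvSqA_map (d : Bool) (l : List Char) :
    pvSqA d (l.map (fun c => if PySem.Chars.isalnum c then c else '-')) = pvSqA d l := by
  induction l generalizing d with
  | nil => rfl
  | cons c t ih =>
    by_cases hal : PySem.Chars.isalnum c = true
    · simp only [List.map_cons, if_pos hal]
      simp only [pvSqA, if_pos hal, ih]
    · have hal' : PySem.Chars.isalnum c = false := Bool.eq_false_iff.mpr hal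
      simp only [List.map_cons, hal', Bool.false_eq_true, if_false]
      simp only [pvSqA, hal', show PySem.Chars.isalnum '-' = false by decide,
        Bool.false_eq_true, if_false, ih]

-- predicate bridge: stripChars ['-'] uses List.contains
theorem pvContains_dash : (fun c => List.contains ['-'] c) = (fun c : Char => c == '-') := by
  funext c
  show (c == '-' || List.elem c []) = (c == '-')
  simp

-- every character of the mapped list is alnum-or-dash
theorem pvMapped_P (l : List Char) :
    ∀ c ∈ l.map (fun c => if PySem.Chars.isalnum c then c else '-'),
      PySem.Chars.isalnum c = !(c == '-') := by
  intro c hc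
  rw [List.mem_map] at hc
  obtain ⟨x, _, hx⟩ := hc
  by_cases hal : PySem.Chars.isalnum x = true
  · rw [if_pos hal] at hx
    rw [← hx, hal, pvAlnum_ne_dash x hal]
    rfl
  · have hal' : PySem.Chars.isalnum x = false := Bool.eq_false_iff.mpr hal
    rw [hal'] at hx
    simp only [Bool.false_eq_true, if_false] at hx
    rw [← hx]
    decide

-- main list-level equality
theorem pvMain (l : List Char) :
    pvWhileReplace (PySem.Chars.stripChars
        (l.map (fun c => if PySem.Chars.isalnum c then c else '-')) ['-'])
    = pvPopTrailingDash (l.foldl (fun acc c =>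
        if PySem.Chars.isalnum c then acc ++ [c]
        else if !acc.isEmpty && acc.getLast? != some '-' then acc ++ ['-'] else acc) []) := by
  set s := l.map (fun c => if PySem.Chars.isalnum c then c else '-') with hs
  set u := s.dropWhile (fun c => c == '-') with hu
  -- left side
  have hstrip : PySem.Chars.stripChars s ['-'] = pvRstrip u := by
    show (List.dropWhile _ (List.dropWhile _ s).reverse).reverse = _
    rw [show (fun c => List.contains ['-'] c) = (fun c : Char => c == '-') from pvContains_dash]
    rw [← hu]
    exact pvRstrip_eq u
  rw [hstrip, pvWhileReplace_eq_Sq]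
  -- right side
  rw [pvFoldl_eq_SqA]
  simp only [List.isEmpty_nil, Bool.true_or, List.nil_append]
  rw [← pvSqA_map true l, ← hs]
  rw [← pvSqA_dropWhile s, ← hu]
  have hP : ∀ c ∈ u, PySem.Chars.isalnum c = !(c == '-') := by
    intro c hc
    exact pvMapped_P l c (by rw [← hs] at *; exact (List.dropWhile_suffix _).subset (hu ▸ hc))
  rw [(pvSqA_eq_Sq u.length u le_rfl hP).1 (hu ▸ pvHead_dropWhile_ne s)]
  exact (pvPop_Sq_eq_Sq_rstrip u).symm

-- ===== VERDICT (by name: the statement is the Claim_ definition above) =====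
theorem sanitize_delegate_name_part_py_spec : Claim_equal_sanitize_delegate_name_part_py := by
  intro value _
  unfold Spec_sanitize_delegate_name_part_py
  unfold sanitize_delegate_name_part_py sanitize_delegate_name_part_py_alt
  simp only [pvMain (PySem.Chars.lower value.toList)]
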